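-- pv_equiv track=rewrite | github.com/nisadn/be-meedle | bsbi/views.py | vb_decode
-- ===== SOURCE A (Python) =====
-- def vb_decode(encoded_bytestream):
--     """
--     Decoding sebuah bytestream yang sebelumnya di-encode dengan
--     variable-byte encoding.
--     """
--     # TODO
--     # slide 5 - page 36
--     numbers = []
--     n = 0
--     for i in range(len(encoded_bytestream)):
--         byte = encoded_bytestream[i]
--         if byte < 128:
--             n = 128*n + byte
--         else:
--             n = 128*n + byte-128
--             numbers.append(n)
--             n = 0
--     return numbers
-- ===== SOURCE B (Python) =====
-- def _vb_value(group):
--     v = 0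
--     for d in group:
--         v = 128 * v + d
--     return v
--
--
-- def vb_decode(encoded_bytestream):
--     # Pass 1: partition the stream into completed groups (terminated by a
--     # byte >= 128, whose last digit is byte - 128); a trailing unterminated
--     # group is discarded.
--     groups = []
--     cur = []
--     for byte in encoded_bytestream:
--         if byte < 128:
--             cur.append(byte)
--         else:
--             cur.append(byte - 128)
--             groups.append(cur)
--             cur = []
--     # Pass 2: fold each group into its base-128 value.
--     return [_vb_value(g) for g in groups]
-- ===== Notes on version B (the rewrite author's own statement) =====
-- stated objective: alternative
-- what changed: Replaces A's single interleaved accumulate-and-append loop with two passes: first partition the bytestream into terminator-closed groups (discarding an unterminated tail), then fold each group into its base-128 value.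
import Mathlib
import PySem

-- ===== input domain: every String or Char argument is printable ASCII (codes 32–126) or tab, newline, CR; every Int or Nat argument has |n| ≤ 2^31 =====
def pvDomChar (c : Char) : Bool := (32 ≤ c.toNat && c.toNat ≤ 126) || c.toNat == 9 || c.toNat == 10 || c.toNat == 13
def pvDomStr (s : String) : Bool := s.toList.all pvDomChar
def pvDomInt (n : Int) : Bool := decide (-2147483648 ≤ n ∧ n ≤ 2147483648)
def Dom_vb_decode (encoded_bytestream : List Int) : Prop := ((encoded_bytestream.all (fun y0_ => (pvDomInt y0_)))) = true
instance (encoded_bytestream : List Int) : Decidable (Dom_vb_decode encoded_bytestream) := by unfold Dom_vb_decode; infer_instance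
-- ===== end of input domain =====

-- ===== PORT A =====
-- A: one interleaved loop, state = (numbers, n)
def vb_decode (encoded_bytestream : List Int) : List Int :=
  (encoded_bytestream.foldl
    (fun (st : List Int × Int) byte =>
      if byte < 128 then (st.1, 128 * st.2 + byte)
      else (st.1 ++ [128 * st.2 + byte - 128], 0))
    ([], 0)).1

-- ===== PORT B =====
-- B: partition into completed groups, then fold each group (alternative decomposition)
def vbGroups : List Int → List Int → List (List Int)
  | [], _ => []
  | b :: rest, cur =>
    if b < 128 then vbGroups rest (cur ++ [b])
    else (cur ++ [b - 128]) :: vbGroups rest []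

def vbValue (g : List Int) : Int :=
  g.foldl (fun v d => 128 * v + d) 0

def vb_decode_alt (encoded_bytestream : List Int) : List Int :=
  (vbGroups encoded_bytestream []).map vbValue

-- ===== PRECONDITION & SPEC =====
def Spec_vb_decode (encoded_bytestream : List Int) (out : List Int) : Prop := out = vb_decode_alt encoded_bytestream
instance (encoded_bytestream : List Int) (out : List Int) : Decidable (Spec_vb_decode encoded_bytestream out) := by unfold Spec_vb_decode; infer_instance

-- ===== CLAIM (what is proved, stated in full; the proofs are below) =====
def Claim_equal_vb_decode : Prop := ∀ (encoded_bytestream : List Int), Dom_vb_decode encoded_bytestream → Spec_vb_decode encoded_bytestream (vb_decode encoded_bytestream)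

-- ===== LEMMAS AND PROOFS =====

-- ===== VERDICT (by name: the statement is the Claim_ definition above) =====
theorem vbValue_concat (cur : List Int) (d : Int) :
    vbValue (cur ++ [d]) = 128 * vbValue cur + d := by
  simp [vbValue, List.foldl_append]

theorem vb_decode_invariant (l : List Int) :
    ∀ (acc cur : List Int),
      (l.foldl
        (fun (st : List Int × Int) byte =>
          if byte < 128 then (st.1, 128 * st.2 + byte)
          else (st.1 ++ [128 * st.2 + byte - 128], 0))
        (acc, vbValue cur)).1
      = acc ++ (vbGroups l cur).map vbValue := by
  induction l with
  | nil => intro acc cur; simp [vbGroups]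
  | cons b rest ih =>
    intro acc cur
    by_cases hb : b < 128
    · simpa [vbGroups, hb, vbValue_concat] using ih acc (cur ++ [b])
    · simp only [List.foldl_cons, vbGroups]
      rw [if_neg hb, if_neg hb]
      have key := ih (acc ++ [128 * vbValue cur + b - 128]) []
      rw [show vbValue [] = (0 : Int) from rfl] at key
      rw [key]
      simp only [List.map_cons, vbValue_concat, List.append_assoc, List.cons_append,
        List.nil_append, List.singleton_append]
      ring_nf

theorem vb_decode_spec : Claim_equal_vb_decode := by
  intro xs _
  unfold Spec_vb_decode vb_decode vb_decode_alt
  have := vb_decode_invariant xs [] []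
  simpa [vbValue] using this
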